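-- pv_equiv track=rewrite | github.com/esaari1/adventofcode | 2015/day8.py | getLengthB
-- ===== SOURCE A (Python) =====
-- def getLengthB(s):
-- 	idx = 0
--
-- 	# start
-- 	s2 = "\"\\\""
--
-- 	subs = s[1:len(s) - 1]
-- 	idx = 0
-- 	while idx < len(subs):
-- 		if subs[idx] == "\\":
-- 			s2 += "\\\\"
-- 		elif subs[idx] == "\"":
-- 			s2 += "\\\""
-- 		else:
-- 			s2 += subs[idx]
-- 		idx += 1
--
-- 	# end
-- 	s2 += "\\\"\""
-- 	return len(s2) - len(s)
-- ===== SOURCE B (Python) =====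
-- def getLengthB(s):
-- 	sub = s[1:-1]
-- 	return 6 + len(sub) + sub.count("\\") + sub.count("\"") - len(s)
-- ===== Notes on version B (the rewrite author's own statement) =====
-- stated objective: simpler
-- what changed: Replaces the per-character loop that builds the escaped string with a closed-form arithmetic count: 6 + len(sub) + sub.count('\') + sub.count('"') - len(s) over the same slice.
import Mathlib
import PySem

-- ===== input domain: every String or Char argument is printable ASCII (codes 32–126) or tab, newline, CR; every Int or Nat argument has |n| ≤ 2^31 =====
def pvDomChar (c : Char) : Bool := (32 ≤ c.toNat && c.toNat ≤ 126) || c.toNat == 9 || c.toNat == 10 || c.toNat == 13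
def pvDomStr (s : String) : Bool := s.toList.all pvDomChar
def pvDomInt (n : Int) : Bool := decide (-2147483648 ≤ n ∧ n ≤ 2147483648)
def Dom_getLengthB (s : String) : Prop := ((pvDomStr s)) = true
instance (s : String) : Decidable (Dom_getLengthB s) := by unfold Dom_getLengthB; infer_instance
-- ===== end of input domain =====

-- B replaces A's character-by-character escaped-string building with a closed-form count (simpler).

-- ===== PORT A =====
-- the while loop: s2 grows by the escape of each character of subs in order
def getLengthB_loop (s2 : List Char) (subs : List Char) : List Char :=
  match subs with
  | [] => s2
  | c :: rest =>
      getLengthB_loop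
        (s2 ++ (if c = '\\' then ['\\', '\\'] else if c = '"' then ['\\', '"'] else [c])) rest

def getLengthB (s : String) : Int :=
  let cs := s.toList
  let s2 := ['"', '\\', '"']                                  -- "\"\\\""
  let subs := PySem.List.slice cs (some 1) (some ((cs.length : Int) - 1))  -- s[1:len(s)-1]
  let s2' := getLengthB_loop s2 subs
  let s2'' := s2' ++ ['\\', '"', '"']                          -- += "\\\"\""
  (s2''.length : Int) - (cs.length : Int)

-- ===== PORT B =====
def getLengthB_alt (s : String) : Int :=
  let sub := PySem.List.slice s.toList (some 1) (some (-1))    -- s[1:-1]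
  6 + (sub.length : Int) + (sub.count '\\' : Int) + (sub.count '"' : Int)
    - (s.toList.length : Int)

-- ===== PRECONDITION & SPEC =====
def Spec_getLengthB (s : String) (out : Int) : Prop := out = getLengthB_alt s
instance (s : String) (out : Int) : Decidable (Spec_getLengthB s out) := by unfold Spec_getLengthB; infer_instance

-- ===== CLAIM (what is proved, stated in full; the proofs are below) =====
def Claim_equal_getLengthB : Prop := ∀ (s : String), Dom_getLengthB s → Spec_getLengthB s (getLengthB s)

-- ===== LEMMAS AND PROOFS =====
theorem getLengthB_loop_length (subs s2 : List Char) :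
    (getLengthB_loop s2 subs).length
      = s2.length + subs.length + subs.count '\\' + subs.count '"' := by
  induction subs generalizing s2 with
  | nil => simp [getLengthB_loop]
  | cons c rest ih =>
    simp only [getLengthB_loop, ih, List.length_append, List.count_cons]
    by_cases h1 : c = '\\'
    · simp [h1]; omega
    · by_cases h2 : c = '"'
      · simp [h1, h2]; omega
      · simp [h1, h2]; omega

theorem slice_eq_slice (cs : List Char) :
    PySem.List.slice cs (some 1) (some ((cs.length : Int) - 1))
      = PySem.List.slice cs (some 1) (some (-1)) := by
  rcases cs with _ | ⟨c, rest⟩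
  · rfl
  · simp only [PySem.List.slice, PySem.List.clampIdx, List.length_cons]
    norm_num
    split_ifs <;> omega

-- ===== VERDICT (by name: the statement is the Claim_ definition above) =====
theorem getLengthB_spec : Claim_equal_getLengthB := by
  intro s _
  unfold Spec_getLengthB getLengthB getLengthB_alt
  simp only [slice_eq_slice, getLengthB_loop_length, List.length_append]
  simp only [List.length_cons, List.length_nil]
  push_cast
  ring
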